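-- pv_equiv track=rewrite | github.com/webcloudstudio/Specifications | bin/project_manager.py | get_next_level
-- ===== SOURCE A (Python) =====
-- STATUS_ORDER = ["IDEA", "PROTOTYPE", "ACTIVE", "PRODUCTION", "ARCHIVED"]
--
-- def get_next_level(status: str) -> str | None:
--     if status in ("ARCHIVED", "PRODUCTION"):
--         return None
--     idx = STATUS_ORDER.index(status) if status in STATUS_ORDER else 0
--     for level in STATUS_ORDER[idx + 1:]:
--         if level != "ARCHIVED":
--             return level
--     return None
-- ===== SOURCE B (Python) =====
-- _NEXT = {
--     "IDEA": "PROTOTYPE",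
--     "PROTOTYPE": "ACTIVE",
--     "ACTIVE": "PRODUCTION",
--     "PRODUCTION": None,
--     "ARCHIVED": None,
-- }
--
-- def get_next_level(status: str) -> str | None:
--     return _NEXT.get(status, "PROTOTYPE")
-- ===== Notes on version B (the rewrite author's own statement) =====
-- stated objective: simpler
-- what changed: Replaced the membership guard, list index computation, slice and scan loop by a single precomputed successor table consulted once with a PROTOTYPE default for unknown statuses.
import Mathlib
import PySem

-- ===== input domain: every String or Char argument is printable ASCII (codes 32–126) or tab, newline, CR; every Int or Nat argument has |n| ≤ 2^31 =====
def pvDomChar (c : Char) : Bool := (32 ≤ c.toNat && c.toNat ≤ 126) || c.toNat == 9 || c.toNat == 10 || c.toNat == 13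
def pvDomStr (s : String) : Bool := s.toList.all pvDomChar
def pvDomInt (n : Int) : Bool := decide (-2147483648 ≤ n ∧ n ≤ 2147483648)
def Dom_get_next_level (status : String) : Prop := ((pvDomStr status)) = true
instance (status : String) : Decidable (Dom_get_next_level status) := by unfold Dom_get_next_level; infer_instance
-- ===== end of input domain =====

-- B replaces A's index/slice/scan with a one-shot lookup in a precomputed successor table (simpler).

-- ===== PORT A =====
def STATUS_ORDER : List String := ["IDEA", "PROTOTYPE", "ACTIVE", "PRODUCTION", "ARCHIVED"]

-- the 'for level in STATUS_ORDER[idx+1:]' loop, returning at the first non-ARCHIVED level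
def pvLoopA : List String → Option String
  | [] => none
  | l :: rest => if l ≠ "ARCHIVED" then some l else pvLoopA rest

def get_next_level (status : String) : Option String :=
  if status = "ARCHIVED" ∨ status = "PRODUCTION" then none
  else
    let idx : Int :=
      if status ∈ STATUS_ORDER then (((PySem.List.index? STATUS_ORDER status).getD 0 : Nat) : Int) else 0
    pvLoopA (PySem.List.slice STATUS_ORDER (some (idx + 1)) none)

-- ===== PORT B =====
def pvNEXT : PySem.Dict String (Option String) :=
  ((((PySem.Dict.empty.insert "IDEA" (some "PROTOTYPE")).insert
      "PROTOTYPE" (some "ACTIVE")).insert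
      "ACTIVE" (some "PRODUCTION")).insert
      "PRODUCTION" none).insert
      "ARCHIVED" none

def get_next_level_alt (status : String) : Option String :=
  (pvNEXT.get? status).getD (some "PROTOTYPE")

-- ===== PRECONDITION & SPEC =====
def Spec_get_next_level (status : String) (out : Option String) : Prop := out = get_next_level_alt status
instance (status : String) (out : Option String) : Decidable (Spec_get_next_level status out) := by unfold Spec_get_next_level; infer_instance

-- ===== CLAIM (what is proved, stated in full; the proofs are below) =====
def Claim_equal_get_next_level : Prop := ∀ (status : String), Dom_get_next_level status → Spec_get_next_level status (get_next_level status)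

-- ===== LEMMAS AND PROOFS =====
theorem get_next_level_eq_alt (status : String) :
    get_next_level status = get_next_level_alt status := by
  by_cases h1 : status = "IDEA"; · subst h1; decide
  by_cases h2 : status = "PROTOTYPE"; · subst h2; decide
  by_cases h3 : status = "ACTIVE"; · subst h3; decide
  by_cases h4 : status = "PRODUCTION"; · subst h4; decide
  by_cases h5 : status = "ARCHIVED"; · subst h5; decide
  -- unknown status: A falls back to idx = 0, returns "PROTOTYPE"; B's lookup misses, default "PROTOTYPE"
  have hmem : status ∉ STATUS_ORDER := by
    simp [STATUS_ORDER, h1, h2, h3, h4, h5]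
  unfold get_next_level get_next_level_alt
  rw [if_neg (by tauto)]
  rw [if_neg hmem]
  have hget : pvNEXT.get? status = none := by
    simp [pvNEXT, PySem.Dict.insert, PySem.Dict.empty, PySem.Dict.get?,
      Ne.symm h1, Ne.symm h2, Ne.symm h3, Ne.symm h4, Ne.symm h5]
  rw [hget]
  show pvLoopA (PySem.List.slice STATUS_ORDER (some ((0 : Int) + 1)) none) = _
  decide

-- ===== VERDICT (by name: the statement is the Claim_ definition above) =====
theorem get_next_level_spec : Claim_equal_get_next_level := by
  intro status _
  unfold Spec_get_next_level
  exact get_next_level_eq_alt status
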